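-- pv_equiv track=rewrite | github.com/RushaanRajeshPai/SYNAPSE-TASKS | t1c.py | explode_chains
-- ===== SOURCE A (Python) =====
-- def explode_chains(sublists):
--     result = []
--     for sublist in sublists:
--         new_sublist = []
--         i = 0
--         while i < len(sublist):
--             if i + 2 < len(sublist) and sublist[i] + 1 == sublist[i+1] and sublist[i] + 2 == sublist[i+2]:
--                 i += 3
--             else:
--                 new_sublist.append(sublist[i])
--                 i += 1
--         result.append(new_sublist)
--     return result
-- ===== SOURCE B (Python) =====
-- def explode_chains(sublists):
--     result = []
--     for sublist in sublists:
--         out = []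
--         pend = []
--         for x in sublist:
--             pend.append(x)
--             if len(pend) == 3:
--                 if pend[0] + 1 == pend[1] and pend[0] + 2 == pend[2]:
--                     pend = []
--                 else:
--                     out.append(pend.pop(0))
--         result.append(out + pend)
--     return result
-- ===== Notes on version B (the rewrite author's own statement) =====
-- stated objective: alternative
-- what changed: Replaces the index-based while-scan (computing len, testing i+2<len, jumping i by 1 or 3) with a single for-each pass over the elements that maintains a sliding buffer of at most two pending elements, dropping the buffer when it completes an ascending triple and otherwise emitting its oldest element.
import Mathlib
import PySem

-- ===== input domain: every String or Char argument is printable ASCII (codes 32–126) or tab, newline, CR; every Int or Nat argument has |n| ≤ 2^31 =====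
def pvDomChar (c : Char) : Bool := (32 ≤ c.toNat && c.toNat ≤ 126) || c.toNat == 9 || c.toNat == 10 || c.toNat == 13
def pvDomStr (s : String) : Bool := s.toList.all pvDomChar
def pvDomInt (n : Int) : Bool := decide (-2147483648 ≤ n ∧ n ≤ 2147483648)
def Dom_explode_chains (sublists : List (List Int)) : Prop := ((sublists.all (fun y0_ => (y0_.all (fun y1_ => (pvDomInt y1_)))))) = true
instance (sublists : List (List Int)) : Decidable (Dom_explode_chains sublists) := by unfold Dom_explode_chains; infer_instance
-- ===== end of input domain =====

-- B replaces A's index-based while-scan with a one-pass sliding buffer of ≤2 pending elements (alternative decomposition, same cost).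

-- ===== PORT A =====
-- the while-loop over index i, accessing sublist[i], sublist[i+1], sublist[i+2]
def pvLoopA (s : List Int) (i : Nat) : List Int :=
  if i < s.length then
    if i + 2 < s.length ∧
        (PySem.List.pyGet? s (i : Int)).getD 0 + 1 = (PySem.List.pyGet? s ((i : Nat) + 1 : Nat)).getD 0 ∧
        (PySem.List.pyGet? s (i : Int)).getD 0 + 2 = (PySem.List.pyGet? s ((i : Nat) + 2 : Nat)).getD 0 then
      pvLoopA s (i + 3)
    else
      (PySem.List.pyGet? s (i : Int)).getD 0 :: pvLoopA s (i + 1)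
  else []
termination_by s.length - i

def explode_chains (sublists : List (List Int)) : List (List Int) :=
  sublists.foldl (fun result sublist => result ++ [pvLoopA sublist 0]) []

-- ===== PORT B =====
-- state = (out, pend); pend holds at most two pending elements
def pvStepB (st : List Int × List Int) (x : Int) : List Int × List Int :=
  let pend := st.2 ++ [x]
  if pend.length = 3 then
    if pend.getD 0 0 + 1 = pend.getD 1 0 ∧ pend.getD 0 0 + 2 = pend.getD 2 0 then
      (st.1, [])
    else
      (st.1 ++ [pend.getD 0 0], pend.drop 1)
  else (st.1, pend)

def pvProcB (s : List Int) : List Int :=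
  let st := s.foldl pvStepB ([], [])
  st.1 ++ st.2

def explode_chains_alt (sublists : List (List Int)) : List (List Int) :=
  sublists.foldl (fun result sublist => result ++ [pvProcB sublist]) []

-- ===== PRECONDITION & SPEC =====
def Spec_explode_chains (sublists : List (List Int)) (out : List (List Int)) : Prop := out = explode_chains_alt sublists
instance (sublists : List (List Int)) (out : List (List Int)) : Decidable (Spec_explode_chains sublists out) := by unfold Spec_explode_chains; infer_instance

-- ===== CLAIM (what is proved, stated in full; the proofs are below) =====
def Claim_equal_explode_chains : Prop := ∀ (sublists : List (List Int)), Dom_explode_chains sublists → Spec_explode_chains sublists (explode_chains sublists)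

-- ===== LEMMAS AND PROOFS =====

-- reference recursion both ports are reduced to
def pvF : List Int → List Int
  | a :: b :: c :: r => if a + 1 = b ∧ a + 2 = c then pvF r else a :: pvF (b :: c :: r)
  | l => l
termination_by l => l.length

theorem pvF_short (l : List Int) (h : l.length ≤ 2) : pvF l = l := by
  match l, h with
  | [], _ => simp [pvF]
  | [a], _ => simp [pvF]
  | [a, b], _ => simp [pvF]

theorem pvLoopA_eq (s : List Int) (i : Nat) : pvLoopA s i = pvF (s.drop i) := by
  fun_induction pvLoopA s i with
  | case1 i hlt hcond ih =>
      obtain ⟨h2, hb, hc⟩ := hcond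
      have e0 : s.drop i = s[i] :: s.drop (i + 1) := List.drop_eq_getElem_cons (by omega)
      have e1 : s.drop (i + 1) = s[i + 1] :: s.drop (i + 2) := List.drop_eq_getElem_cons (by omega)
      have e2 : s.drop (i + 2) = s[i + 2] :: s.drop (i + 3) := List.drop_eq_getElem_cons (by omega)
      simp only [PySem.List.pyGet?_natCast, List.getElem?_eq_getElem, (by omega : i < s.length),
        (by omega : i + 1 < s.length), h2, Option.getD_some] at hb hc
      rw [e0, e1, e2, ih, pvF]
      simp [hb, hc]
  | case2 i hlt hcond ih =>
      have e0 : s.drop i = s[i] :: s.drop (i + 1) := List.drop_eq_getElem_cons (by omega)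
      simp only [PySem.List.pyGet?_natCast, List.getElem?_eq_getElem, hlt, Option.getD_some]
      by_cases h2 : i + 2 < s.length
      · have e1 : s.drop (i + 1) = s[i + 1] :: s.drop (i + 2) := List.drop_eq_getElem_cons (by omega)
        have e2 : s.drop (i + 2) = s[i + 2] :: s.drop (i + 3) := List.drop_eq_getElem_cons (by omega)
        have hfail : ¬ (s[i] + 1 = s[i + 1] ∧ s[i] + 2 = s[i + 2]) := by
          intro ⟨hb, hc⟩
          apply hcond
          refine ⟨h2, ?_, ?_⟩ <;>
            simp only [PySem.List.pyGet?_natCast, List.getElem?_eq_getElem, hlt,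
              (by omega : i + 1 < s.length), h2, Option.getD_some]
          · exact hb
          · exact hc
        rw [e0, ih, e1, e2, pvF]
        simp [hfail]
      · have hsh : (s.drop i).length ≤ 2 := by simp [List.length_drop]; omega
        have hsh1 : (s.drop (i + 1)).length ≤ 2 := by simp [List.length_drop]; omega
        rw [ih, pvF_short _ hsh, pvF_short _ hsh1, e0]
  | case3 i hge =>
      rw [List.drop_eq_nil_of_le (by omega), pvF_short [] (by simp)]

theorem pvFoldB_eq (xs out pend : List Int) (h : pend.length ≤ 2) :
    (let st := xs.foldl pvStepB (out, pend); st.1 ++ st.2) = out ++ pvF (pend ++ xs) := by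
  induction xs generalizing out pend with
  | nil => simp [pvF_short pend h]
  | cons x rest ih =>
      rcases pend with _ | ⟨a, _ | ⟨b, _ | ⟨c, t⟩⟩⟩
      · simpa [pvStepB] using ih out [x] (by simp)
      · simpa [pvStepB] using ih out [a, x] (by simp)
      · by_cases hc : a + 1 = b ∧ a + 2 = x
        · have := ih out [] (by simp)
          simp only [List.foldl_cons, pvStepB] at *
          simp [hc, pvF, this]
        · have := ih (out ++ [a]) [b, x] (by simp)
          simp only [List.foldl_cons, pvStepB] at *
          simp [hc, pvF, this]
      · simp at h

theorem pvFoldl_append_map {α β : Type} (g : α → β) (l : List α) (acc : List β) :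
    l.foldl (fun r s => r ++ [g s]) acc = acc ++ l.map g := by
  induction l generalizing acc with
  | nil => simp
  | cons a t ih => simp [ih]

theorem pvProcB_eq (s : List Int) : pvProcB s = pvF s := by
  have := pvFoldB_eq s [] [] (by simp)
  simpa [pvProcB] using this

-- ===== VERDICT (by name: the statement is the Claim_ definition above) =====
theorem explode_chains_spec : Claim_equal_explode_chains := by
  intro sublists _
  unfold Spec_explode_chains explode_chains explode_chains_alt
  have h : ∀ s : List Int, pvLoopA s 0 = pvProcB s := by
    intro s; rw [pvProcB_eq, pvLoopA_eq]; simp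
  rw [pvFoldl_append_map, pvFoldl_append_map,
    show (fun s : List Int => pvLoopA s 0) = fun s => pvProcB s from funext h]
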